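-- pv_equiv track=rewrite | github.com/sprizend-rh/in-cluster-checks | src/in_cluster_checks/rules/hw_fw_details/collectors/memory_collectors.py | _parse_dmidecode_memory_blocks
-- ===== SOURCE A (Python) =====
-- from typing import Dict, List
--
-- def _parse_dmidecode_memory_blocks(output: str) -> List[Dict[str, str]]:
--     """
--     Parse dmidecode memory output into list of dicts.
--
--     Args:
--         output: Raw dmidecode -t memory output
--
--     Returns:
--         List of memory device info dicts
--     """
--     devices = []
--     current_block = {}
--     in_memory_block = False
--
--     for line in output.splitlines():
--         line_stripped = line.strip()
--
--         # Detect start of memory device block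
--         if line_stripped.startswith("Memory Device"):
--             in_memory_block = True
--             current_block = {}
--             continue
--
--         # Detect end of block (empty line or new handle)
--         if in_memory_block and (not line_stripped or line_stripped.startswith("Handle")):
--             if current_block:
--                 devices.append(current_block)
--                 current_block = {}
--             in_memory_block = False
--             continue
--
--         # Parse key-value pairs
--         if in_memory_block and ":" in line_stripped:
--             key, value = line_stripped.split(":", 1)
--             current_block[key.strip()] = value.strip()
--
--     # Don't forget last block
--     if current_block:
--         devices.append(current_block)
--
--     return devices
-- ===== SOURCE B (Python) =====
-- from typing import Dict, List
--
-- def _parse_dmidecode_memory_blocks(output: str) -> List[Dict[str, str]]: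
--     """Two-phase rewrite: first partition the lines into device segments,
--     then map each segment to its key/value dict."""
--     # Phase 1: collect segments of stripped lines, one per open 'Memory Device'.
--     segments = []
--     current = None  # None = not inside a device segment
--     for line in output.splitlines():
--         s = line.strip()
--         if s.startswith("Memory Device"):
--             current = []          # a repeated header discards the open segment
--         elif current is not None:
--             if not s or s.startswith("Handle"):
--                 segments.append(current)
--                 current = None
--             else:
--                 current.append(s)
--     if current is not None:
--         segments.append(current)
--     # Phase 2: map each segment to a dict; keep only non-empty dicts.
--     devices = []
--     for seg in segments:
--         block = {}
--         for s in seg: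
--             if ":" in s:
--                 key, value = s.split(":", 1)
--                 block[key.strip()] = value.strip()
--         if block:
--             devices.append(block)
--     return devices
-- ===== Notes on version B (the rewrite author's own statement) =====
-- stated objective: alternative
-- what changed: Replaces the single flag-driven loop that builds dicts inline with a two-phase decomposition: one pass partitions the lines into device segments (a repeated 'Memory Device' header discards the open segment), and a second pass maps each segment to its key/value dict, keeping only non-empty ones.
import Mathlib
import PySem

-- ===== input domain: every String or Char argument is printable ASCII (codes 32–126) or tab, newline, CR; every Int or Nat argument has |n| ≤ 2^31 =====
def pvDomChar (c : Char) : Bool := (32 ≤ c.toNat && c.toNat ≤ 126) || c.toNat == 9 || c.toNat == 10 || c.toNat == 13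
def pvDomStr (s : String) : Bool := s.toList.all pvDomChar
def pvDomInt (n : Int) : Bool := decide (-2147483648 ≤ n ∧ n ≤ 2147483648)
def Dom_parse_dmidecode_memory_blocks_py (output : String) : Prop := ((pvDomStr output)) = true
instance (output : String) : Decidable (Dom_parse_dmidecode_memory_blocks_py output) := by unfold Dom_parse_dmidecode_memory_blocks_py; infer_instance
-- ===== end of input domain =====

-- B re-parses the dmidecode output in two phases (segment the lines, then map each
-- segment to its dict) instead of A's single flag-driven loop; same cost, different decomposition.


-- ===== PORT A =====
-- one loop step of A: state (devices, current_block, in_memory_block)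
def pvStepA (st : List (List (String × String)) × PySem.Dict String String × Bool)
    (line : String) : List (List (String × String)) × PySem.Dict String String × Bool :=
  let (devices, current_block, in_memory_block) := st
  let ls := PySem.Str.strip line
  if PySem.Str.startswith ls "Memory Device" then
    (devices, PySem.Dict.empty, true)
  else if in_memory_block && (ls == "" || PySem.Str.startswith ls "Handle") then
    ((if current_block.items.isEmpty then devices else devices ++ [current_block.items]),
      PySem.Dict.empty, false)
  else if in_memory_block && PySem.Str.isIn ":" ls then
    -- key, value = line_stripped.split(":", 1); the fallback is unreachable (":" ∈ ls)
    match PySem.Str.splitMax? ls ":" 1 with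
    | some (key :: value :: _) =>
        (devices, current_block.insert (PySem.Str.strip key) (PySem.Str.strip value), in_memory_block)
    | _ => (devices, current_block, in_memory_block)
  else (devices, current_block, in_memory_block)

def parse_dmidecode_memory_blocks_py (output : String) : List (List (String × String)) :=
  let (devices, current_block, _) :=
    (PySem.Str.splitlines output).foldl pvStepA ([], PySem.Dict.empty, false)
  if current_block.items.isEmpty then devices else devices ++ [current_block.items]

-- ===== PORT B =====
-- phase 1 step: state (segments, current); current = none ↔ not inside a device segment
def pvStepB (st : List (List String) × Option (List String))
    (line : String) : List (List String) × Option (List String) :=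
  let s := PySem.Str.strip line
  if PySem.Str.startswith s "Memory Device" then
    (st.1, some [])
  else
    match st.2 with
    | none => st
    | some cur =>
      if s == "" || PySem.Str.startswith s "Handle" then (st.1 ++ [cur], none)
      else (st.1, some (cur ++ [s]))

-- phase 2: the dict of one segment
def pvDictOfSeg (seg : List String) : PySem.Dict String String :=
  seg.foldl (fun block s =>
    if PySem.Str.isIn ":" s then
      match PySem.Str.splitMax? s ":" 1 with
      | some (key :: value :: _) =>
          block.insert (PySem.Str.strip key) (PySem.Str.strip value)
      | _ => block      -- unreachable: ":" ∈ s
    else block) PySem.Dict.empty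

def parse_dmidecode_memory_blocks_py_alt (output : String) : List (List (String × String)) :=
  let (segments, current) := (PySem.Str.splitlines output).foldl pvStepB ([], none)
  let segments := match current with
    | some cur => segments ++ [cur]
    | none => segments
  segments.foldl (fun devices seg =>
    let block := pvDictOfSeg seg
    if block.items.isEmpty then devices else devices ++ [block.items]) []

-- ===== PRECONDITION & SPEC =====
def Spec_parse_dmidecode_memory_blocks_py (output : String) (out : List (List (String × String))) : Prop := out = parse_dmidecode_memory_blocks_py_alt output
instance (output : String) (out : List (List (String × String))) : Decidable (Spec_parse_dmidecode_memory_blocks_py output out) := by unfold Spec_parse_dmidecode_memory_blocks_py; infer_instance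

-- ===== CLAIM (what is proved, stated in full; the proofs are below) =====
def Claim_equal_parse_dmidecode_memory_blocks_py : Prop := ∀ (output : String), Dom_parse_dmidecode_memory_blocks_py output → Spec_parse_dmidecode_memory_blocks_py output (parse_dmidecode_memory_blocks_py output)

-- ===== LEMMAS AND PROOFS =====

-- B's phase 2 as a function (for stating the invariant)
def pvRender (segs : List (List String)) : List (List (String × String)) :=
  segs.foldl (fun devices seg =>
    let block := pvDictOfSeg seg
    if block.items.isEmpty then devices else devices ++ [block.items]) []

-- the dict A has accumulated while inside a block = the dict of B's open segment
def pvDictOfOpt (cur : Option (List String)) : PySem.Dict String String :=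
  match cur with
  | none => PySem.Dict.empty
  | some c => pvDictOfSeg c

-- A's final flush, as a function of A's loop state
def pvFinishA (st : List (List (String × String)) × PySem.Dict String String × Bool) :
    List (List (String × String)) :=
  if st.2.1.items.isEmpty then st.1 else st.1 ++ [st.2.1.items]

-- B's phase 2 applied to B's phase-1 state
def pvFinishB (st : List (List String) × Option (List String)) :
    List (List (String × String)) :=
  pvRender (match st.2 with
    | some c => st.1 ++ [c]
    | none => st.1)

lemma pvRender_append (segs : List (List String)) (c : List String) :
    pvRender (segs ++ [c]) =
      (if (pvDictOfSeg c).items.isEmpty then pvRender segs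
       else pvRender segs ++ [(pvDictOfSeg c).items]) := by
  simp only [pvRender, List.foldl_append, List.foldl_cons, List.foldl_nil]

lemma pvDictOfSeg_append (c : List String) (s : String) :
    pvDictOfSeg (c ++ [s]) =
      (if PySem.Str.isIn ":" s then
        match PySem.Str.splitMax? s ":" 1 with
        | some (key :: value :: _) =>
            (pvDictOfSeg c).insert (PySem.Str.strip key) (PySem.Str.strip value)
        | _ => pvDictOfSeg c
       else pvDictOfSeg c) := by
  simp only [pvDictOfSeg, List.foldl_append, List.foldl_cons, List.foldl_nil]

-- step lemmas for A's loop, one per branch (variable state, so simp stays cheap)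
lemma pvStepA_md (devs : List (List (String × String))) (d : PySem.Dict String String)
    (b : Bool) (l : String)
    (hmd : PySem.Str.startswith (PySem.Str.strip l) "Memory Device" = true) :
    pvStepA (devs, d, b) l = (devs, PySem.Dict.empty, true) := by
  simp only [pvStepA, hmd, if_true]

lemma pvStepA_idle (devs : List (List (String × String))) (d : PySem.Dict String String)
    (l : String)
    (hmd : PySem.Str.startswith (PySem.Str.strip l) "Memory Device" = false) :
    pvStepA (devs, d, false) l = (devs, d, false) := by
  simp only [pvStepA, hmd, Bool.false_eq_true, if_false, Bool.false_and]

lemma pvStepA_end (devs : List (List (String × String))) (d : PySem.Dict String String)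
    (l : String)
    (hmd : PySem.Str.startswith (PySem.Str.strip l) "Memory Device" = false)
    (hend : (PySem.Str.strip l == "" || PySem.Str.startswith (PySem.Str.strip l) "Handle") = true) :
    pvStepA (devs, d, true) l =
      ((if d.items.isEmpty then devs else devs ++ [d.items]), PySem.Dict.empty, false) := by
  simp only [pvStepA, hmd, Bool.false_eq_true, if_false, Bool.true_and, hend, if_true]

lemma pvStepA_kv (devs : List (List (String × String))) (d : PySem.Dict String String)
    (l : String)
    (hmd : PySem.Str.startswith (PySem.Str.strip l) "Memory Device" = false)
    (hend : (PySem.Str.strip l == "" || PySem.Str.startswith (PySem.Str.strip l) "Handle") = false) :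
    pvStepA (devs, d, true) l =
      (devs,
       (if PySem.Str.isIn ":" (PySem.Str.strip l) then
          match PySem.Str.splitMax? (PySem.Str.strip l) ":" 1 with
          | some (key :: value :: _) =>
              d.insert (PySem.Str.strip key) (PySem.Str.strip value)
          | _ => d
        else d), true) := by
  simp only [pvStepA, hmd, Bool.false_eq_true, if_false, Bool.true_and, hend]
  cases hcol : PySem.Str.isIn ":" (PySem.Str.strip l) with
  | false => simp only [Bool.false_eq_true, if_false]
  | true =>
    simp only [if_true]
    cases PySem.Str.splitMax? (PySem.Str.strip l) ":" 1 with
    | none => rfl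
    | some parts =>
      cases parts with
      | nil => rfl
      | cons k t => cases t with
        | nil => rfl
        | cons v t' => rfl

-- step lemmas for B's loop
lemma pvStepB_md (segs : List (List String)) (cur : Option (List String)) (l : String)
    (hmd : PySem.Str.startswith (PySem.Str.strip l) "Memory Device" = true) :
    pvStepB (segs, cur) l = (segs, some []) := by
  simp only [pvStepB, hmd, if_true]

lemma pvStepB_idle (segs : List (List String)) (l : String)
    (hmd : PySem.Str.startswith (PySem.Str.strip l) "Memory Device" = false) :
    pvStepB (segs, none) l = (segs, none) := by
  simp only [pvStepB, hmd, Bool.false_eq_true, if_false]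

lemma pvStepB_end (segs : List (List String)) (c : List String) (l : String)
    (hmd : PySem.Str.startswith (PySem.Str.strip l) "Memory Device" = false)
    (hend : (PySem.Str.strip l == "" || PySem.Str.startswith (PySem.Str.strip l) "Handle") = true) :
    pvStepB (segs, some c) l = (segs ++ [c], none) := by
  simp only [pvStepB, hmd, Bool.false_eq_true, if_false, hend, if_true]

lemma pvStepB_grow (segs : List (List String)) (c : List String) (l : String)
    (hmd : PySem.Str.startswith (PySem.Str.strip l) "Memory Device" = false)
    (hend : (PySem.Str.strip l == "" || PySem.Str.startswith (PySem.Str.strip l) "Handle") = false) :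
    pvStepB (segs, some c) l = (segs, some (c ++ [PySem.Str.strip l])) := by
  simp only [pvStepB, hmd, Bool.false_eq_true, if_false, hend]

-- main invariant: running A's loop from a state corresponding to B's state
-- (devices = rendered closed segments, current_block = dict of the open segment,
--  in_memory_block ↔ a segment is open) and flushing yields B's final result.
lemma pv_main (lines : List String) : ∀ (segs : List (List String)) (cur : Option (List String)),
    pvFinishA (lines.foldl pvStepA (pvRender segs, pvDictOfOpt cur, cur.isSome)) =
    pvFinishB (lines.foldl pvStepB (segs, cur)) := by
  induction lines with
  | nil =>
    intro segs cur
    cases cur with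
    | none => rfl
    | some c =>
      show pvFinishA (pvRender segs, pvDictOfSeg c, true) = pvRender (segs ++ [c])
      rw [pvRender_append]; rfl
  | cons l rest ih =>
    intro segs cur
    simp only [List.foldl_cons]
    cases hmd : PySem.Str.startswith (PySem.Str.strip l) "Memory Device" with
    | true =>
      rw [pvStepA_md _ _ _ _ hmd, pvStepB_md _ _ _ hmd]
      exact ih segs (some [])
    | false =>
      cases cur with
      | none =>
        rw [show pvDictOfOpt none = PySem.Dict.empty from rfl,
          show (none : Option (List String)).isSome = false from rfl,
          pvStepA_idle _ _ _ hmd, pvStepB_idle _ _ hmd]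
        exact ih segs none
      | some c =>
        cases hend : (PySem.Str.strip l == "" || PySem.Str.startswith (PySem.Str.strip l) "Handle") with
        | true =>
          rw [show pvDictOfOpt (some c) = pvDictOfSeg c from rfl,
            show ((some c).isSome) = true from rfl,
            pvStepA_end _ _ _ hmd hend, pvStepB_end _ _ _ hmd hend, ← pvRender_append]
          exact ih (segs ++ [c]) none
        | false =>
          rw [show pvDictOfOpt (some c) = pvDictOfSeg c from rfl,
            show ((some c).isSome) = true from rfl,
            pvStepA_kv _ _ _ hmd hend, pvStepB_grow _ _ _ hmd hend, ← pvDictOfSeg_append]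
          exact ih segs (some (c ++ [PySem.Str.strip l]))

-- ===== VERDICT (by name: the statement is the Claim_ definition above) =====
theorem parse_dmidecode_memory_blocks_py_spec : Claim_equal_parse_dmidecode_memory_blocks_py := by
  intro output _
  show parse_dmidecode_memory_blocks_py output = parse_dmidecode_memory_blocks_py_alt output
  have hA : parse_dmidecode_memory_blocks_py output =
      pvFinishA ((PySem.Str.splitlines output).foldl pvStepA ([], PySem.Dict.empty, false)) := by
    unfold parse_dmidecode_memory_blocks_py pvFinishA
    rcases (PySem.Str.splitlines output).foldl pvStepA ([], PySem.Dict.empty, false) with ⟨d, c, f⟩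
    rfl
  have hB : parse_dmidecode_memory_blocks_py_alt output =
      pvFinishB ((PySem.Str.splitlines output).foldl pvStepB ([], none)) := by
    unfold parse_dmidecode_memory_blocks_py_alt pvFinishB pvRender
    rcases (PySem.Str.splitlines output).foldl pvStepB ([], none) with ⟨segs, cur⟩
    rfl
  rw [hA, hB]
  exact pv_main (PySem.Str.splitlines output) [] none
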